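-- pv_equiv track=rewrite | github.com/Chiheb-Edine-Zoghlemi/TIC_TAC_TOE | player.py | wins_by_row
-- ===== SOURCE A (Python) =====
-- def wins_by_row(dimension):
--     moves=[]
--     for i in range(1,dimension**2+1,dimension) :
--         combo=[]
--         for j in range(i,dimension+i) :
--             combo.append(j)
--         moves.append(combo)
--     return  moves
-- ===== SOURCE B (Python) =====
-- def wins_by_row(dimension):
--     flat = range(1, dimension ** 2 + 1)
--     return [list(flat[k:k + dimension]) for k in range(0, dimension ** 2, dimension)]
-- ===== Notes on version B (the rewrite author's own statement) =====
-- stated objective: simpler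
-- what changed: B builds the flat 1..n^2 sequence once and slices it into length-n rows, instead of rebuilding each row element-by-element with a nested append loop.
import Mathlib
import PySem

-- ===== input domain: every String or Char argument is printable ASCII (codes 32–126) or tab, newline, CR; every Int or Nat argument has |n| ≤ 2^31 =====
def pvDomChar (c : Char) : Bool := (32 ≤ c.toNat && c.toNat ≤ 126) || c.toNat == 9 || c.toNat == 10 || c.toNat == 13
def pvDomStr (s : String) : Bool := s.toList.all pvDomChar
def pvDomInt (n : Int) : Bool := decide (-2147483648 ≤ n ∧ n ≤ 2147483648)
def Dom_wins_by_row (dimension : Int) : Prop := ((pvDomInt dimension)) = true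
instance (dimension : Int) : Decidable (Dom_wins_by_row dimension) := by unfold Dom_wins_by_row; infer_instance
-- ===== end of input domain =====

-- B slices one flat 1..n^2 list into length-n rows instead of A's nested element-by-element append loops (objective: simpler).

-- ===== PORT A =====
def wins_by_row (dimension : Int) : List (List Int) :=
  (PySem.List.pyRange 1 (dimension ^ 2 + 1) dimension).foldl
    (fun moves i =>
      moves ++ [(PySem.List.pyRange i (dimension + i) 1).foldl (fun combo j => combo ++ [j]) []])
    []

-- ===== PORT B =====
def wins_by_row_alt (dimension : Int) : List (List Int) :=
  -- flat is Python's lazy range(1, dimension**2+1); sliced per row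
  (PySem.List.pyRange 0 (dimension ^ 2) dimension).map
    (fun k => PySem.List.slice (PySem.List.pyRange 1 (dimension ^ 2 + 1) 1)
      (some k) (some (k + dimension)))

-- ===== PRECONDITION & SPEC =====
-- Pre_ excludes dimension = 0, where the Python A (and B) raise ValueError (range step 0).
def Pre_wins_by_row (dimension : Int) : Prop := dimension ≠ 0
instance (dimension : Int) : Decidable (Pre_wins_by_row dimension) := by unfold Pre_wins_by_row; infer_instance
def pvWitness_wins_by_row : Int := 3

def Spec_wins_by_row (dimension : Int) (out : List (List Int)) : Prop := out = wins_by_row_alt dimension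
instance (dimension : Int) (out : List (List Int)) : Decidable (Spec_wins_by_row dimension out) := by unfold Spec_wins_by_row; infer_instance

-- ===== CLAIM (what is proved, stated in full; the proofs are below) =====
def Claim_equal_wins_by_row : Prop := ∀ (dimension : Int), Dom_wins_by_row dimension → Pre_wins_by_row dimension → Spec_wins_by_row dimension (wins_by_row dimension)

-- ===== LEMMAS AND PROOFS =====

-- Both outer ranges are trivially empty for negative dimension.
theorem pv_neg_A (d : Int) (hd : d < 0) : wins_by_row d = [] := by
  unfold wins_by_row
  rw [show PySem.List.pyRange 1 (d ^ 2 + 1) d = [] from ?_]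
  · rfl
  · simp [PySem.List.pyRange, hd.ne, lt_asymm hd, show ¬ d ^ 2 + 1 < 1 by nlinarith [sq_nonneg d]]

theorem pv_neg_B (d : Int) (hd : d < 0) : wins_by_row_alt d = [] := by
  unfold wins_by_row_alt
  rw [show PySem.List.pyRange 0 (d ^ 2) d = [] from ?_]
  · rfl
  · simp [PySem.List.pyRange, hd.ne, lt_asymm hd, show ¬ d ^ 2 < 0 by nlinarith [sq_nonneg d]]

-- The inner append loop just reproduces its range.
theorem pv_inner (l : List Int) : l.foldl (fun combo j => combo ++ [j]) [] = l := by
  simpa using PySem.List.foldl_append_singleton l []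

-- Count of a positive-step range over exactly d·d elements.
theorem pv_count (d : Int) (hd : 0 < d) : (d * d + d - 1) / d = d := by
  have h1 : (d - 1) + d * d = d * d + d - 1 := by ring
  rw [← h1, Int.add_mul_ediv_right _ _ (by omega : d ≠ 0),
    Int.ediv_eq_zero_of_lt (by omega) (by omega)]
  omega

-- One row: slicing the flat 1..d² list at offset d·k yields the contiguous range.
theorem pv_row (d : Int) (hd : 0 < d) (k : Nat) (hk : (k : Int) < d) :
    PySem.List.slice (PySem.List.pyRange 1 (d ^ 2 + 1) 1) (some (d * k)) (some (d * k + d))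
      = PySem.List.pyRange (1 + d * k) (1 + d * k + d) 1 := by
  have h0 : (0 : Int) ≤ d * k := by positivity
  have hdd : d * k + d ≤ d * d := by nlinarith
  have hbn : (0 : Int) ≤ d * k + d := by omega
  rw [PySem.List.slice_toNat _ h0 hbn]
  have hsplit1 : PySem.List.pyRange 1 (d ^ 2 + 1) 1
      = PySem.List.pyRange 1 (1 + d * k) 1 ++ PySem.List.pyRange (1 + d * k) (d ^ 2 + 1) 1 :=
    PySem.List.pyRange_one_append _ _ _ (by omega) (by nlinarith)
  have hsplit2 : PySem.List.pyRange (1 + d * k) (d ^ 2 + 1) 1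
      = PySem.List.pyRange (1 + d * k) (1 + d * k + d) 1
        ++ PySem.List.pyRange (1 + d * k + d) (d ^ 2 + 1) 1 :=
    PySem.List.pyRange_one_append _ _ _ (by omega) (by nlinarith)
  have hl1 : (PySem.List.pyRange 1 (1 + d * k) 1).length = (d * k).toNat := by
    rw [PySem.List.length_pyRange_one]; congr 1; omega
  have hl2 : (PySem.List.pyRange (1 + d * k) (1 + d * k + d) 1).length = d.toNat := by
    rw [PySem.List.length_pyRange_one]; congr 1; omega
  have htake : (d * k + d).toNat - (d * k).toNat = d.toNat := by omega
  rw [htake, hsplit1, ← hl1, List.drop_left, hsplit2, ← hl2, List.take_left]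

-- Main positive case: both sides are the same map over List.range d.toNat.
theorem pv_pos (d : Int) (hd : 0 < d) : wins_by_row d = wins_by_row_alt d := by
  have hcnt : (d ^ 2 + 1 - 1 + d - 1) / d = d := by
    have : d ^ 2 + 1 - 1 + d - 1 = d * d + d - 1 := by ring
    rw [this, pv_count d hd]
  have hcnt' : (d ^ 2 - 0 + d - 1) / d = d := by
    have : d ^ 2 - 0 + d - 1 = d * d + d - 1 := by ring
    rw [this, pv_count d hd]
  have hA : PySem.List.pyRange 1 (d ^ 2 + 1) d
      = (List.range d.toNat).map (fun k : Nat => 1 + d * (k : Int)) := by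
    rw [PySem.List.pyRange_of_pos _ _ hd, if_pos (by nlinarith), hcnt]
  have hB : PySem.List.pyRange 0 (d ^ 2) d
      = (List.range d.toNat).map (fun k : Nat => 0 + d * (k : Int)) := by
    rw [PySem.List.pyRange_of_pos _ _ hd, if_pos (by nlinarith), hcnt']
  unfold wins_by_row wins_by_row_alt
  simp only [pv_inner]
  rw [PySem.List.foldl_append_singleton_eq_map (fun i => PySem.List.pyRange i (d + i) 1)]
  rw [hA, hB]
  simp only [List.map_map, List.nil_append]
  apply List.map_congr_left
  intro k hk
  simp only [Function.comp, zero_add]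
  have hk' : (k : Int) < d := by
    have := List.mem_range.mp hk; omega
  rw [pv_row d hd k hk']
  congr 1
  ring

theorem wins_by_row_spec : Claim_equal_wins_by_row := by
  intro d _ hpre
  unfold Spec_wins_by_row
  rcases lt_trichotomy d 0 with h | h | h
  · rw [pv_neg_A d h, pv_neg_B d h]
  · exact absurd h hpre
  · exact pv_pos d h
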